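-- pv_equiv track=rewrite | github.com/david-crow/afit | courses/spring19/advanced algorithms/assignments/homework 7/genetic-scp/main.py | covered
-- ===== SOURCE A (Python) =====
-- def covered(string, edges):
--     c = []
--
--     # if s is in the covering set
--     for i, s in enumerate(string):
--         if s == "1":
--             c.append(i)
--
--             # check for every edge leaving s
--             for e in edges:
--                 if e[0] == i:
--                     c.append(e[1])
--
--     # we only want unique values
--     return list(set(c))
-- ===== SOURCE B (Python) =====
-- def covered(string, edges):
--     # covered indices, in order
--     cov = [i for i, s in enumerate(string) if s == "1"]
--     if not cov:
--         return []
--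
--     # single pass over edges: hash-index the targets of each covered source
--     covs = set(cov)
--     by_src = {}
--     for e in edges:
--         if e[0] in covs:
--             by_src.setdefault(e[0], []).append(e[1])
--
--     c = []
--     for i in cov:
--         c.append(i)
--         c.extend(by_src.get(i, []))
--     return list(set(c))
-- ===== Notes on version B (the rewrite author's own statement) =====
-- stated objective: alternative
-- what changed: Inverts the loop nesting: B computes the covered-index set once, makes a single pass over edges building a hash index from covered source to its targets, then emits each covered index with its indexed targets, instead of A's re-scan of all edges for every covered index (same measured cost on the generated inputs).
import Mathlib
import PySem

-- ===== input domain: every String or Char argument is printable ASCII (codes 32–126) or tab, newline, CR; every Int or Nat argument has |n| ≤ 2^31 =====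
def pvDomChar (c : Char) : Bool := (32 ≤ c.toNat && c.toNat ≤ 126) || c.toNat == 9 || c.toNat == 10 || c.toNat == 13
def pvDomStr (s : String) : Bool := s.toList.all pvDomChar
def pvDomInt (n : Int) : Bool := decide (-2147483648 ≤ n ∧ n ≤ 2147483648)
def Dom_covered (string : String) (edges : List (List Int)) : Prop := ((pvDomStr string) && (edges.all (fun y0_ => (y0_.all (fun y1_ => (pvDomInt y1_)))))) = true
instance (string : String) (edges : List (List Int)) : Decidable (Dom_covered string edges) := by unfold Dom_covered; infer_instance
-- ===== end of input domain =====

-- B inverts A's loop nesting: one pass computes the covered indices, one single pass over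
-- edges builds a hash index source -> targets, replacing A's re-scan of all edges per covered index.



-- ===== PORT A =====
def covered (string : String) (edges : List (List Int)) : List Int :=
  let c : List Int := (PySem.List.enumerate string.toList 0).foldl
    (fun c p =>
      if p.2 == '1' then
        edges.foldl
          (fun c e =>
            if PySem.List.pyGetD e 0 0 == p.1 then c ++ [PySem.List.pyGetD e 1 0] else c)
          (c ++ [p.1])
      else c) []
  PySem.Set.ofList c

-- ===== PORT B =====
-- positions of '1' in the string, in order (B's list comprehension)
def onesIdx (string : String) : List Int :=
  (PySem.List.enumerate string.toList 0).filterMap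
    (fun p => if p.2 == '1' then some p.1 else none)

def covered_alt (string : String) (edges : List (List Int)) : List Int :=
  let cov := onesIdx string
  if cov = [] then []
  else
    let covs : PySem.Set Int := PySem.Set.ofList cov
    -- by_src.setdefault(e[0], []).append(e[1])  =  modify key [] (append target)
    let bySrc : PySem.Dict Int (List Int) := edges.foldl
      (fun d e =>
        if PySem.Set.contains covs (PySem.List.pyGetD e 0 0) then
          d.modify (PySem.List.pyGetD e 0 0) [] (fun l => l ++ [PySem.List.pyGetD e 1 0])
        else d)
      PySem.Dict.empty
    let c : List Int := cov.foldl (fun c i => (c ++ [i]) ++ bySrc.getD i []) []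
    PySem.Set.ofList c

-- ===== PRECONDITION & SPEC =====
-- Pre_ excludes exactly the inputs on which the Python A raises IndexError: when the
-- string contains a '1', every edge must be nonempty, and an edge whose source is a
-- covered index must also carry a target (length >= 2).
def Pre_covered (string : String) (edges : List (List Int)) : Prop :=
  onesIdx string ≠ [] → ∀ e ∈ edges, e ≠ [] ∧ (e.headD 0 ∈ onesIdx string → 2 ≤ e.length)
instance (string : String) (edges : List (List Int)) : Decidable (Pre_covered string edges) := by unfold Pre_covered; infer_instance
def pvWitness_covered : String × List (List Int) := ("1x1", [[0, 5], [3, 7], [2, 0]])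

def Spec_covered (string : String) (edges : List (List Int)) (out : List Int) : Prop := out = covered_alt string edges
instance (string : String) (edges : List (List Int)) (out : List Int) : Decidable (Spec_covered string edges out) := by unfold Spec_covered; infer_instance

-- ===== CLAIM (what is proved, stated in full; the proofs are below) =====
def Claim_equal_covered : Prop := ∀ (string : String) (edges : List (List Int)), Dom_covered string edges → Pre_covered string edges → Spec_covered string edges (covered string edges)

-- ===== LEMMAS AND PROOFS =====

-- targets of the edges leaving i (the common characterisation of both loops)
def tgtOf (edges : List (List Int)) (i : Int) : List Int :=
  (edges.filter (fun e => PySem.List.pyGetD e 0 0 == i)).map (fun e => PySem.List.pyGetD e 1 0)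

-- A's nested loops flatten to blocks  i :: tgtOf edges i  over the covered indices
theorem covA_outer (edges : List (List Int)) (ps : List (Int × Char)) (init : List Int) :
    ps.foldl
      (fun c p =>
        if p.2 == '1' then
          edges.foldl
            (fun c e =>
              if PySem.List.pyGetD e 0 0 == p.1 then c ++ [PySem.List.pyGetD e 1 0] else c)
            (c ++ [p.1])
        else c) init
    = init ++ (ps.filterMap (fun p => if p.2 == '1' then some p.1 else none)).flatMap
        (fun i => i :: tgtOf edges i) := by
  induction ps generalizing init with
  | nil => simp
  | cons p ps ih =>
    by_cases h : p.2 == '1'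
    · simp only [List.foldl_cons, h, if_pos, List.filterMap_cons]
      rw [ih, PySem.List.foldl_append_if (fun e => PySem.List.pyGetD e 0 0 == p.1)
        (fun e => PySem.List.pyGetD e 1 0) edges (init ++ [p.1])]
      simp [tgtOf]
    · simp only [List.foldl_cons, h, List.filterMap_cons]
      rw [ih]
      simp

-- B's emit loop flattens to the same blocks
theorem covB_outer (F : Int → List Int) (is : List Int) (init : List Int) :
    is.foldl (fun c i => (c ++ [i]) ++ F i) init = init ++ is.flatMap (fun i => i :: F i) := by
  induction is generalizing init with
  | nil => simp
  | cons i is ih =>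
    rw [List.foldl_cons, ih]
    simp

-- B's single edges pass indexes exactly the targets of each covered source
theorem bySrc_getD (edges : List (List Int)) (covs : PySem.Set Int) (i : Int)
    (hc : PySem.Set.contains covs i = true) :
    (edges.foldl
      (fun d e =>
        if PySem.Set.contains covs (PySem.List.pyGetD e 0 0) then
          d.modify (PySem.List.pyGetD e 0 0) [] (fun l => l ++ [PySem.List.pyGetD e 1 0])
        else d)
      PySem.Dict.empty).getD i []
    = tgtOf edges i := by
  have h1 : (edges.foldl
      (fun d e =>
        if PySem.Set.contains covs (PySem.List.pyGetD e 0 0) then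
          d.modify (PySem.List.pyGetD e 0 0) [] (fun l => l ++ [PySem.List.pyGetD e 1 0])
        else d)
      PySem.Dict.empty)
      = (((edges.filter (fun e => PySem.Set.contains covs (PySem.List.pyGetD e 0 0))).map
          (fun e => (PySem.List.pyGetD e 0 0, PySem.List.pyGetD e 1 0))).foldl
          (fun d p => d.modify p.1 [] (fun l => l ++ [p.2])) PySem.Dict.empty) := by
    rw [List.foldl_map, List.foldl_filter]
  rw [h1, PySem.Dict.getD_foldl_modify_append, List.filter_map]
  simp only [List.filter_filter, List.map_map, Function.comp_def]
  have hf : List.filter (fun a => (PySem.List.pyGetD a 0 0 == i) && covs.contains (PySem.List.pyGetD a 0 0)) edges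
      = List.filter (fun e => PySem.List.pyGetD e 0 0 == i) edges := by
    apply List.filter_congr
    intro e _
    by_cases h : PySem.List.pyGetD e 0 0 = i
    · simp [h]
      simpa using hc
    · simp [h]
  rw [hf]
  simp [tgtOf, pysem]

theorem covA_char (string : String) (edges : List (List Int)) :
    covered string edges
      = PySem.Set.ofList ((onesIdx string).flatMap (fun i => i :: tgtOf edges i)) := by
  unfold covered onesIdx
  dsimp only
  rw [covA_outer]
  simp

theorem covB_char (string : String) (edges : List (List Int)) :
    covered_alt string edges
      = PySem.Set.ofList ((onesIdx string).flatMap (fun i => i :: tgtOf edges i)) := by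
  unfold covered_alt
  dsimp only
  by_cases h : onesIdx string = []
  · simp [h]
  · rw [if_neg h, covB_outer, List.nil_append, List.flatMap_def, List.flatMap_def]
    congr 1
    congr 1
    apply List.map_congr_left
    intro i hi
    rw [bySrc_getD]
    simpa [PySem.Set.mem_ofList] using hi

-- ===== VERDICT (by name: the statement is the Claim_ definition above) =====
theorem covered_spec : Claim_equal_covered := by
  intro string edges _ _
  unfold Spec_covered
  rw [covA_char, covB_char]
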